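-- pv_equiv track=rewrite | github.com/ferikkusu/py2plantuml | src/py2plantuml/parser/class_parser.py | _find_field_lines
-- ===== SOURCE A (Python) =====
-- from typing import List
--
-- def _find_field_lines(lines: List[str]) -> List[str]:
--     class_definition_line_index: int = -1
--     first_function_definition_line_index: int = -1
--     for i in range(len(lines)):
--         if lines[i].strip().startswith("class"):
--             class_definition_line_index = i
--         elif lines[i].strip().startswith("def"):
--             first_function_definition_line_index = i
--             break
--
--     return lines[class_definition_line_index+1:first_function_definition_line_index]
-- ===== SOURCE B (Python) =====
-- from typing import List
--
-- def _find_field_lines(lines: List[str]) -> List[str]: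
--     func_idx = next((i for i, l in enumerate(lines) if l.strip().startswith("def")), -1)
--     region = lines if func_idx == -1 else lines[:func_idx]
--     class_idx = max((i for i, l in enumerate(region) if l.strip().startswith("class")), default=-1)
--     return lines[class_idx + 1:func_idx]
-- ===== Notes on version B (the rewrite author's own statement) =====
-- stated objective: alternative
-- what changed: Replaces the single interleaved scan with break and two index variables by two independent scans: first find the first 'def' index, then take the last 'class' index within the region before it, finally return the same slice.
import Mathlib
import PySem

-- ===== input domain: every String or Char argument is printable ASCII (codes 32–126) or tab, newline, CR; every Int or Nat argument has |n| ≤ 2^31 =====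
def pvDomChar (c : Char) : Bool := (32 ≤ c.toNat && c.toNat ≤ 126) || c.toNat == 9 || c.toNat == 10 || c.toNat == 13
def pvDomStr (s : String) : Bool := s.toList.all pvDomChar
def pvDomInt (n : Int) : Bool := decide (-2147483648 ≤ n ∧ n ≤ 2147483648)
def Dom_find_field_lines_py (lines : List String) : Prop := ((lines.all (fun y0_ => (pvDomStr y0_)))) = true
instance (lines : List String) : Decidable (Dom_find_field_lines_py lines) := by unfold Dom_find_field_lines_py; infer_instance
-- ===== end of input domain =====

-- B replaces A's single interleaved break-loop by two independent scans (first-'def' index, then last-'class' index in the region before it); same O(n) cost, alternative decomposition.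

-- ===== PORT A =====
-- A's for-loop over range(len(lines)) with break, carrying both indices.
def aScan : List String → Int → Int → Int → Int × Int
  | [], _, ci, fi => (ci, fi)
  | l :: rest, i, ci, fi =>
    if PySem.Str.startswith (PySem.Str.strip l) "class" then aScan rest (i + 1) i fi
    else if PySem.Str.startswith (PySem.Str.strip l) "def" then (ci, i)
    else aScan rest (i + 1) ci fi

def find_field_lines_py (lines : List String) : List String :=
  let p := aScan lines 0 (-1) (-1)
  PySem.List.slice lines (some (p.1 + 1)) (some p.2)

-- ===== PORT B =====
-- next((i for i, l in enumerate(lines) if l.strip().startswith("def")), -1)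
def bFirstDef : List String → Int → Int
  | [], _ => -1
  | l :: rest, i =>
    if PySem.Str.startswith (PySem.Str.strip l) "def" then i else bFirstDef rest (i + 1)

-- max((i for i, l in enumerate(region) if l.strip().startswith("class")), default=-1)
def bLastClass : List String → Int → Int → Int
  | [], _, acc => acc
  | l :: rest, i, acc =>
    bLastClass rest (i + 1)
      (if PySem.Str.startswith (PySem.Str.strip l) "class" then max acc i else acc)

def find_field_lines_py_alt (lines : List String) : List String :=
  let fi := bFirstDef lines 0
  let region := if fi = -1 then lines else PySem.List.slice lines (some 0) (some fi)
  let ci := bLastClass region 0 (-1)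
  PySem.List.slice lines (some (ci + 1)) (some fi)

-- ===== PRECONDITION & SPEC =====
def Spec_find_field_lines_py (lines : List String) (out : List String) : Prop := out = find_field_lines_py_alt lines
instance (lines : List String) (out : List String) : Decidable (Spec_find_field_lines_py lines out) := by unfold Spec_find_field_lines_py; infer_instance

-- ===== CLAIM (what is proved, stated in full; the proofs are below) =====
def Claim_equal_find_field_lines_py : Prop := ∀ (lines : List String), Dom_find_field_lines_py lines → Spec_find_field_lines_py lines (find_field_lines_py lines)

-- ===== LEMMAS AND PROOFS =====

-- a line cannot start with both "class" and "def"
lemma cls_not_def (s : String) (h : PySem.Str.startswith s "class" = true) :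
    PySem.Str.startswith s "def" = false := by
  simp only [PySem.Str.startswith] at *
  rw [PySem.Chars.startswith_iff] at h
  by_contra hd
  rw [Bool.not_eq_false, PySem.Chars.startswith_iff] at hd
  obtain ⟨t1, h1⟩ := h
  obtain ⟨t2, h2⟩ := hd
  rw [← h1] at h2
  have := congrArg (fun l => l[0]?) h2
  simp at this

-- first-def index: either absent (all lines kept by takeWhile) or at the takeWhile boundary
lemma bFirstDef_spec (ls : List String) (i : Int) :
    (bFirstDef ls i = -1 ∧ ls.takeWhile (fun l => !PySem.Str.startswith (PySem.Str.strip l) "def") = ls) ∨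
    bFirstDef ls i = i + ((ls.takeWhile (fun l => !PySem.Str.startswith (PySem.Str.strip l) "def")).length : Int) := by
  induction ls generalizing i with
  | nil => left; exact ⟨rfl, rfl⟩
  | cons l rest ih =>
    simp only [bFirstDef, List.takeWhile_cons]
    by_cases hd : PySem.Str.startswith (PySem.Str.strip l) "def" = true
    · right
      rw [if_pos hd, if_neg (show ¬((!PySem.Str.startswith (PySem.Str.strip l) "def") = true) by rw [hd]; decide)]
      simp
    · rw [Bool.not_eq_true] at hd
      rw [if_neg (show ¬(PySem.Str.startswith (PySem.Str.strip l) "def" = true) by rw [hd]; decide),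
        if_pos (show (!PySem.Str.startswith (PySem.Str.strip l) "def") = true by rw [hd]; decide)]
      rcases ih (i + 1) with ⟨h1, h2⟩ | h1
      · left
        rw [h1, h2]
        exact ⟨rfl, rfl⟩
      · right
        rw [h1]
        simp only [List.length_cons]
        push_cast
        ring

-- A's loop equals B's two scans
lemma key (ls : List String) (i ci : Int) (h : ci < i) :
    aScan ls i ci (-1) =
      (bLastClass (ls.takeWhile (fun l => !PySem.Str.startswith (PySem.Str.strip l) "def")) i ci,
       bFirstDef ls i) := by
  induction ls generalizing i ci with
  | nil => rfl
  | cons l rest ih =>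
    simp only [aScan, bFirstDef, List.takeWhile_cons]
    by_cases hc : PySem.Str.startswith (PySem.Str.strip l) "class" = true
    · have hd := cls_not_def _ hc
      rw [if_pos hc, if_pos (show (!PySem.Str.startswith (PySem.Str.strip l) "def") = true by rw [hd]; decide),
        if_neg (show ¬(PySem.Str.startswith (PySem.Str.strip l) "def" = true) by rw [hd]; decide)]
      simp only [bLastClass]
      rw [if_pos hc, max_eq_right h.le]
      exact ih (i + 1) i (by omega)
    · by_cases hd : PySem.Str.startswith (PySem.Str.strip l) "def" = true
      · rw [if_neg hc, if_pos hd,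
          if_neg (show ¬((!PySem.Str.startswith (PySem.Str.strip l) "def") = true) by rw [hd]; decide),
          if_pos hd]
        rfl
      · rw [Bool.not_eq_true] at hd
        rw [if_neg hc, if_neg (show ¬(PySem.Str.startswith (PySem.Str.strip l) "def" = true) by rw [hd]; decide),
          if_pos (show (!PySem.Str.startswith (PySem.Str.strip l) "def") = true by rw [hd]; decide),
          if_neg (show ¬(PySem.Str.startswith (PySem.Str.strip l) "def" = true) by rw [hd]; decide)]
        simp only [bLastClass]
        rw [if_neg hc]
        exact ih (i + 1) ci (by omega)

-- ===== VERDICT (by name: the statement is the Claim_ definition above) =====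
theorem find_field_lines_py_spec : Claim_equal_find_field_lines_py := by
  intro lines _
  unfold Spec_find_field_lines_py
  simp only [find_field_lines_py, find_field_lines_py_alt]
  rw [key lines 0 (-1) (by norm_num)]
  rcases bFirstDef_spec lines 0 with ⟨h1, h2⟩ | h1
  · rw [h1, h2, if_pos rfl]
  · have hfi : bFirstDef lines 0 = ((lines.takeWhile
        (fun l => !PySem.Str.startswith (PySem.Str.strip l) "def")).length : Int) := by
      rw [h1, zero_add]
    have hne : ¬ (bFirstDef lines 0 = -1) := by rw [hfi]; omega
    rw [if_neg hne]
    have hreg : PySem.List.slice lines (some 0) (some (bFirstDef lines 0)) =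
        lines.takeWhile (fun l => !PySem.Str.startswith (PySem.Str.strip l) "def") := by
      rw [hfi, PySem.List.slice_zero_start, PySem.List.slice_to_natCast]
      exact (List.prefix_iff_eq_take.mp (List.takeWhile_prefix _)).symm
    rw [hreg]
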